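-- pv_equiv track=rewrite | github.com/BrrrJia/lexicon-sentiment-analysis | senti_final.py | label_sentiment
-- ===== SOURCE A (Python) =====
-- def label_sentiment(lemmatized_review: list[str], lexicon: dict) -> str:
--     """
--     analyzes the sentiment of a lemmatized review and assigns it a label
--     :param lemmatized_review: list of lemmata in a review
--     :param lexicon: dict produced with read_lexicon(), containing words as
--     keys and sentiment information as values
--     :return: label: string indicating sentiment of the analyzed review
--     """
--     # default label is 'neutral' (no occurrences of positive or negative words)
--     label = 'neutral'
--     pos_words, neg_words = 0, 0  # track occurrences of positive or negative words
--     for lemma in lemmatized_review: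
--         try:
--             sentiment = lexicon[lemma][0]
--             # check if lemma is positive or negative
--             if sentiment[:3] == 'NEG':
--                 neg_words += 1
--             elif sentiment[:3] == 'POS':
--                 pos_words += 1
--         except:  # if lemma not in lexicon
--             pass
--     # label review according to count of positive and negative words
--     if pos_words == 0 and neg_words > 0:
--         label = 'negativ'
--     elif neg_words == 0 and pos_words > 0:
--         label = 'positiv'
--     elif pos_words > 0 and neg_words > 0:
--         label = 'gemischt'
--     return label
-- ===== SOURCE B (Python) =====
-- def label_sentiment(lemmatized_review: list[str], lexicon: dict) -> str:
--     # Precompute the positive and negative vocabularies once, then decide by set presence.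
--     pos_words = {w for w, s in lexicon.items() if s and s[0][:3] == 'POS'}
--     neg_words = {w for w, s in lexicon.items() if s and s[0][:3] == 'NEG'}
--     review = set(lemmatized_review)
--     has_pos = not pos_words.isdisjoint(review)
--     has_neg = not neg_words.isdisjoint(review)
--     return ('gemischt' if has_pos and has_neg else
--             'positiv' if has_pos else
--             'negativ' if has_neg else
--             'neutral')
-- ===== Notes on version B (the rewrite author's own statement) =====
-- stated objective: alternative
-- what changed: B precomputes the positive/negative vocabularies from the lexicon once as sets and decides the label by set-disjointness tests on the deduplicated review, instead of A's per-lemma try/except lookup with two running counters and a four-branch count ladder; Pre_ only excludes association lists with duplicate keys, which represent no Python dict.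
import Mathlib
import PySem

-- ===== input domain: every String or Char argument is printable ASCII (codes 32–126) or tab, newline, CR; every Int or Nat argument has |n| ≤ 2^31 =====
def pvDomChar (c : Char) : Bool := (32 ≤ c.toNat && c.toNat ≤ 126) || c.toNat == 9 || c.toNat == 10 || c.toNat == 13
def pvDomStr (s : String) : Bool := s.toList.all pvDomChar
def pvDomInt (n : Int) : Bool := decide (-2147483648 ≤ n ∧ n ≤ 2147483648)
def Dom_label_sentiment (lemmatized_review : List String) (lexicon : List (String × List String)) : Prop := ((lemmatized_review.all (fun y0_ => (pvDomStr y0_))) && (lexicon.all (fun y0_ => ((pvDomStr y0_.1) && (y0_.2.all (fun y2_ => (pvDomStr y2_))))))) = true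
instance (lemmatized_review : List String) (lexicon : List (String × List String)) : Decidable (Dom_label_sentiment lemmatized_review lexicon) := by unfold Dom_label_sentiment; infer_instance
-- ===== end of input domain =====

-- B replaces A's per-lemma counting loop by precomputed POS/NEG vocabularies and set-presence dispatch (alternative decomposition, not claimed faster).


-- ===== PORT A =====
-- loop body of A: try: sentiment = lexicon[lemma][0]; count NEG/POS; except: pass
def stepA (lexicon : List (String × List String)) (acc : Nat × Nat) (lem : String) : Nat × Nat :=
  match (PySem.Dict.mk lexicon).get? lem with
  | none => acc                                   -- KeyError swallowed by bare except
  | some vs =>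
    match PySem.List.pyGet? vs 0 with
    | none => acc                                 -- IndexError swallowed by bare except
    | some sentiment =>
      if PySem.Str.slice sentiment none (some 3) == "NEG" then (acc.1, acc.2 + 1)
      else if PySem.Str.slice sentiment none (some 3) == "POS" then (acc.1 + 1, acc.2)
      else acc

def label_sentiment (lemmatized_review : List String) (lexicon : List (String × List String)) : String :=
  -- label = 'neutral'; pos_words, neg_words = 0, 0; for lemma in ...
  let counts : Nat × Nat := lemmatized_review.foldl (stepA lexicon) (0, 0)
  if counts.1 == 0 && decide (counts.2 > 0) then "negativ"
  else if counts.2 == 0 && decide (counts.1 > 0) then "positiv"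
  else if decide (counts.1 > 0) && decide (counts.2 > 0) then "gemischt"
  else "neutral"

-- ===== PORT B =====
def label_sentiment_alt (lemmatized_review : List String) (lexicon : List (String × List String)) : String :=
  let pos_words : PySem.Set String := PySem.Set.ofList ((lexicon.filter (fun p =>
    match p.2 with
    | [] => false
    | s :: _ => PySem.Str.slice s none (some 3) == "POS")).map Prod.fst)
  let neg_words : PySem.Set String := PySem.Set.ofList ((lexicon.filter (fun p =>
    match p.2 with
    | [] => false
    | s :: _ => PySem.Str.slice s none (some 3) == "NEG")).map Prod.fst)
  let review : PySem.Set String := PySem.Set.ofList lemmatized_review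
  let has_pos := !(PySem.Set.isdisjoint pos_words review)
  let has_neg := !(PySem.Set.isdisjoint neg_words review)
  if has_pos && has_neg then "gemischt"
  else if has_pos then "positiv"
  else if has_neg then "negativ"
  else "neutral"

-- ===== PRECONDITION & SPEC =====
-- Pre_ excludes association lists whose keys repeat: they represent no Python dict (dict keys are
-- unique), and only there could A's first-match lookup and B's whole-list scan disagree.
def Pre_label_sentiment (lemmatized_review : List String) (lexicon : List (String × List String)) : Prop :=
  (lexicon.map Prod.fst).Nodup
instance (lemmatized_review : List String) (lexicon : List (String × List String)) : Decidable (Pre_label_sentiment lemmatized_review lexicon) := by unfold Pre_label_sentiment; infer_instance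
def pvWitness_label_sentiment : List String × (List (String × List String)) := (["gut", "schlecht"], [("gut", ["POS1.0"]), ("schlecht", ["NEG1.0"])])

def Spec_label_sentiment (lemmatized_review : List String) (lexicon : List (String × List String)) (out : String) : Prop := out = label_sentiment_alt lemmatized_review lexicon
instance (lemmatized_review : List String) (lexicon : List (String × List String)) (out : String) : Decidable (Spec_label_sentiment lemmatized_review lexicon out) := by unfold Spec_label_sentiment; infer_instance

-- ===== CLAIM (what is proved, stated in full; the proofs are below) =====
def Claim_equal_label_sentiment : Prop := ∀ (lemmatized_review : List String) (lexicon : List (String × List String)), Dom_label_sentiment lemmatized_review lexicon → Pre_label_sentiment lemmatized_review lexicon → Spec_label_sentiment lemmatized_review lexicon (label_sentiment lemmatized_review lexicon)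

-- ===== LEMMAS AND PROOFS =====

-- "lemma w is looked up (first match) to a POS/NEG entry" — the predicate both sides turn on
def hits (lexicon : List (String × List String)) (tag : String) (w : String) : Bool :=
  match (PySem.Dict.mk lexicon).get? w with
  | some (s :: _) => PySem.Str.slice s none (some 3) == tag
  | _ => false

theorem foldA_counts (lexicon : List (String × List String)) (ls : List String) (p n : Nat) :
    ls.foldl (stepA lexicon) (p, n)
    = (p + ls.countP (hits lexicon "POS"), n + ls.countP (hits lexicon "NEG")) := by
  induction ls generalizing p n with
  | nil => simp
  | cons x xs ih =>
    simp only [List.foldl_cons, List.countP_cons]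
    have hstep : ∀ q m, stepA lexicon (q, m) x
        = (q + (if hits lexicon "POS" x then 1 else 0), m + (if hits lexicon "NEG" x then 1 else 0)) := by
      intro q m
      unfold stepA hits
      rcases hg : (PySem.Dict.mk lexicon).get? x with _ | (_ | ⟨s, rest⟩)
      · simp
      · simp [PySem.List.pyGet?]
      · by_cases hneg : PySem.Str.slice s none (some 3) == "NEG"
        · have hpos : (PySem.Str.slice s none (some 3) == "POS") = false := by
            cases h : (PySem.Str.slice s none (some 3) == "POS")
            · rfl
            · exact absurd (beq_iff_eq.mp h ▸ beq_iff_eq.mp hneg) (by simp_all)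
          simp [hneg, hpos]
        · by_cases hpos : PySem.Str.slice s none (some 3) == "POS" <;>
            simp [hneg, hpos]
    rw [hstep, ih]
    cases hits lexicon "POS" x <;> cases hits lexicon "NEG" x <;>
      simp [Prod.ext_iff] <;> omega

theorem mem_vocab_iff (lexicon : List (String × List String)) (tag w : String)
    (hnd : (lexicon.map Prod.fst).Nodup) :
    (w ∈ (lexicon.filter (fun p =>
      match p.2 with
      | [] => false
      | s :: _ => PySem.Str.slice s none (some 3) == tag)).map Prod.fst) ↔ hits lexicon tag w = true := by
  have hkeys : (PySem.Dict.mk lexicon).keys.Nodup := hnd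
  unfold hits
  constructor
  · intro h
    obtain ⟨⟨k, v⟩, hmem, rfl⟩ := List.mem_map.mp h
    have hf := List.of_mem_filter hmem
    have hm := List.mem_of_mem_filter hmem
    rcases v with _ | ⟨s, rest⟩
    · simp at hf
    · have : (PySem.Dict.mk lexicon).get? k = some (s :: rest) :=
        (PySem.Dict.get?_eq_some_iff_mem_items (PySem.Dict.mk lexicon) k (s :: rest) hkeys).mpr hm
      simp_all
  · intro h
    rcases hg : (PySem.Dict.mk lexicon).get? w with _ | (_ | ⟨s, rest⟩)
    · simp [hg] at h
    · simp [hg] at h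
    · simp only [hg] at h
      have hm : (w, s :: rest) ∈ lexicon :=
        (PySem.Dict.get?_eq_some_iff_mem_items (PySem.Dict.mk lexicon) w (s :: rest) hkeys).mp hg
      exact List.mem_map.mpr ⟨(w, s :: rest), List.mem_filter.mpr ⟨hm, by simpa using h⟩, rfl⟩

theorem hasTag_eq (lemmatized_review : List String) (lexicon : List (String × List String))
    (tag : String) (hnd : (lexicon.map Prod.fst).Nodup) :
    (!(PySem.Set.isdisjoint
        (PySem.Set.ofList ((lexicon.filter (fun p =>
          match p.2 with
          | [] => false
          | s :: _ => PySem.Str.slice s none (some 3) == tag)).map Prod.fst))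
        (PySem.Set.ofList lemmatized_review)))
    = decide (0 < lemmatized_review.countP (hits lexicon tag)) := by
  rw [Bool.eq_iff_iff]
  rw [Bool.not_eq_eq_eq_not, Bool.not_true, ← Bool.not_eq_true, PySem.Set.isdisjoint_iff]
  simp only [not_forall, not_not, List.countP_pos_iff, PySem.Set.mem_ofList,
    decide_eq_true_eq]
  constructor
  · rintro ⟨x, hx, hr⟩
    exact ⟨x, hr, (mem_vocab_iff lexicon tag x hnd).mp hx⟩
  · rintro ⟨x, hr, hx⟩
    exact ⟨x, (mem_vocab_iff lexicon tag x hnd).mpr hx, hr⟩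

-- ===== VERDICT (by name: the statement is the Claim_ definition above) =====
theorem label_sentiment_spec : Claim_equal_label_sentiment := by
  intro ls lex _ hpre
  unfold Spec_label_sentiment label_sentiment label_sentiment_alt
  rw [foldA_counts]
  simp only [hasTag_eq ls lex "POS" hpre, hasTag_eq ls lex "NEG" hpre]
  by_cases hP : 0 < ls.countP (hits lex "POS") <;>
    by_cases hN : 0 < ls.countP (hits lex "NEG") <;>
      simp_all [Nat.pos_iff_ne_zero, List.countP_eq_zero]
  obtain ⟨x, hx, hhx⟩ := hP
  obtain ⟨y, hy, hhy⟩ := hN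
  rw [if_neg (fun h => by simpa [hhx] using h x hx),
      if_neg (fun h => by simpa [hhy] using h y hy)]
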